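-- pv_equiv track=rewrite | github.com/shauryashaurya/The-Silmaril | o-02-Music/rdf_ontology_manager.py | _is_valid_uri
-- ===== SOURCE A (Python) =====
-- def _is_valid_uri(uri_str: str) -> bool:
--     """Check if URI string is valid according to basic URI syntax."""
--     try:
--         # Basic URI validation
--         if not uri_str.startswith(('http://', 'https://', 'urn:')):
--             return False
--
--         # Check for invalid characters
--         invalid_chars = [' ', '\t', '\n', '\r']
--         for char in invalid_chars:
--             if char in uri_str:
--                 return False
--
--         return True
--     except Exception:
--         return False
-- ===== SOURCE B (Python) =====
-- import re
--
-- _URI_RE = re.compile(r'(http://|https://|urn:)[^ \t\n\r]*')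
--
-- def _is_valid_uri(uri_str: str) -> bool:
--     try:
--         return bool(_URI_RE.fullmatch(uri_str))
--     except Exception:
--         return False
-- ===== Notes on version B (the rewrite author's own statement) =====
-- stated objective: idiomatic
-- what changed: Replaces the prefix check plus a loop of four substring scans with a single anchored regex fullmatch of an alternation of the three prefixes followed by a class excluding the four whitespace characters, compiled once.
import Mathlib
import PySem

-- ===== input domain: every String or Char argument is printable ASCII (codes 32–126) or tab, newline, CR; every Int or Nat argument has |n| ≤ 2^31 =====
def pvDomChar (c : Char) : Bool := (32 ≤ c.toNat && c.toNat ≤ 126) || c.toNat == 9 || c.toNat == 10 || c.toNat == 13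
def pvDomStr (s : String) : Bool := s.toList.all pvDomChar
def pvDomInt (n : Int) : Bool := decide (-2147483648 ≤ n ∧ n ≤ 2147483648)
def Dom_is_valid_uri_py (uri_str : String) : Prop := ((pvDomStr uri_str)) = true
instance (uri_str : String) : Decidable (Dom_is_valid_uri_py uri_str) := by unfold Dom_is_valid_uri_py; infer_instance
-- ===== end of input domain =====

-- ===== PORT A =====
-- A: prefix check with str.startswith on a tuple, then a loop over the four
-- whitespace characters testing substring membership.
def is_valid_uri_py (uri_str : String) : Bool :=
  if !(PySem.Str.startswith uri_str "http://" || PySem.Str.startswith uri_str "https://"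
       || PySem.Str.startswith uri_str "urn:") then
    false
  else
    -- 'for char in invalid_chars: if char in uri_str: return False' / 'return True'
    match ([" ", "\t", "\n", "\r"] : List String).find? (fun ch => PySem.Str.isIn ch uri_str) with
    | some _ => false
    | none => true

-- ===== PORT B =====
-- B: one anchored regex fullmatch r'(http://|https://|urn:)[^ \t\n\r]*'.
-- Ported by hand (PySem has no regex engine): the alternation tries the three
-- literal prefixes left to right; the character class must then cover the whole
-- rest of the string (fullmatch). Exact for this concrete regex.
def pyUriAltPrefix (l : List Char) : Option (List Char) :=
  if l.take 7 = "http://".toList then some (l.drop 7)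
  else if l.take 8 = "https://".toList then some (l.drop 8)
  else if l.take 4 = "urn:".toList then some (l.drop 4)
  else none

def is_valid_uri_py_alt (uri_str : String) : Bool :=
  match pyUriAltPrefix uri_str.toList with
  | some rest => rest.all (fun c => !(c == ' ' || c == '\t' || c == '\n' || c == '\r'))
  | none => false

-- ===== PRECONDITION & SPEC =====
def Spec_is_valid_uri_py (uri_str : String) (out : Bool) : Prop := out = is_valid_uri_py_alt uri_str
instance (uri_str : String) (out : Bool) : Decidable (Spec_is_valid_uri_py uri_str out) := by unfold Spec_is_valid_uri_py; infer_instance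

-- ===== CLAIM (what is proved, stated in full; the proofs are below) =====
def Claim_equal_is_valid_uri_py : Prop := ∀ (uri_str : String), Dom_is_valid_uri_py uri_str → Spec_is_valid_uri_py uri_str (is_valid_uri_py uri_str)

-- ===== LEMMAS AND PROOFS =====

def pvNoWs (c : Char) : Bool := !(c == ' ' || c == '\t' || c == '\n' || c == '\r')

-- single-character substring membership is list membership
theorem isIn_singleton_iff (c : Char) (l : List Char) :
    PySem.Chars.isIn [c] l = true ↔ c ∈ l := by
  rw [PySem.Chars.isIn_iff_infix]
  constructor
  · exact fun h => h.mem (by simp)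
  · intro h
    obtain ⟨s, t, rfl⟩ := List.append_of_mem h
    exact ⟨s, t, by simp⟩

theorem isIn_singleton_false_iff (c : Char) (l : List Char) :
    PySem.Chars.isIn [c] l = false ↔ c ∉ l := by
  rw [← isIn_singleton_iff, Bool.not_eq_true, Bool.eq_false_iff, ne_eq]

-- A's inner loop finds nothing exactly when none of the four chars occurs
theorem findws_none_iff (s : String) :
    (([" ", "\t", "\n", "\r"] : List String).find? (fun ch => PySem.Str.isIn ch s) = none)
      ↔ (' ' ∉ s.toList ∧ '\t' ∉ s.toList ∧ '\n' ∉ s.toList ∧ '\r' ∉ s.toList) := by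
  rw [List.find?_eq_none]
  simp only [List.mem_cons, List.not_mem_nil, or_false, forall_eq_or_imp, forall_eq,
    Bool.not_eq_true, PySem.Str.isIn_eq]
  show PySem.Chars.isIn [' '] _ = false ∧ PySem.Chars.isIn ['\t'] _ = false ∧
       PySem.Chars.isIn ['\n'] _ = false ∧ PySem.Chars.isIn ['\r'] _ = false ↔ _
  rw [isIn_singleton_false_iff, isIn_singleton_false_iff, isIn_singleton_false_iff,
    isIn_singleton_false_iff]

-- 'every char passes the class' is 'no forbidden char occurs'
theorem all_noWs_iff (l : List Char) :
    l.all pvNoWs = true ↔ (' ' ∉ l ∧ '\t' ∉ l ∧ '\n' ∉ l ∧ '\r' ∉ l) := by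
  simp only [List.all_eq_true, pvNoWs]
  constructor
  · intro h
    refine ⟨fun hm => ?_, fun hm => ?_, fun hm => ?_, fun hm => ?_⟩ <;> simpa using h _ hm
  · rintro ⟨h1, h2, h3, h4⟩ c hc
    by_cases e1 : c = ' '; · exact absurd (e1 ▸ hc) h1
    by_cases e2 : c = '\t'; · exact absurd (e2 ▸ hc) h2
    by_cases e3 : c = '\n'; · exact absurd (e3 ▸ hc) h3
    by_cases e4 : c = '\r'; · exact absurd (e4 ▸ hc) h4
    simp [e1, e2, e3, e4]

-- splitting off a whitespace-free prefix does not change the class check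
theorem drop_all_eq (l pat : List Char) (h : l.take pat.length = pat)
    (hpat : pat.all pvNoWs = true) :
    (l.drop pat.length).all pvNoWs = l.all pvNoWs := by
  conv_rhs => rw [← List.take_append_drop pat.length l]
  rw [List.all_append, h, hpat, Bool.true_and]

-- A's else-branch computes B's character-class check on the rest
theorem else_branch_eq (s : String) (pat : List Char) (h : s.toList.take pat.length = pat)
    (hpat : pat.all pvNoWs = true) :
    (match ([" ", "\t", "\n", "\r"] : List String).find? (fun ch => PySem.Str.isIn ch s) with
      | some _ => false
      | none => true) = (s.toList.drop pat.length).all pvNoWs := by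
  cases hfind : ([" ", "\t", "\n", "\r"] : List String).find? (fun ch => PySem.Str.isIn ch s) with
  | none =>
    simp only
    rw [drop_all_eq _ _ h hpat]
    exact ((all_noWs_iff _).mpr ((findws_none_iff s).mp hfind)).symm
  | some x =>
    simp only
    by_contra hb
    have hall : (s.toList.drop pat.length).all pvNoWs = true := by
      cases hv : (s.toList.drop pat.length).all pvNoWs
      · exact absurd hv.symm hb
      · rfl
    rw [drop_all_eq _ _ h hpat] at hall
    have := (findws_none_iff s).mpr ((all_noWs_iff _).mp hall)
    rw [hfind] at this
    exact Option.some_ne_none x this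

theorem startswith_take (s : String) (pat : String) :
    PySem.Str.startswith s pat = true ↔ s.toList.take pat.toList.length = pat.toList := by
  rw [PySem.Str.startswith_eq, PySem.Chars.startswith_iff, List.prefix_iff_eq_take]
  exact eq_comm

-- ===== VERDICT (by name: the statement is the Claim_ definition above) =====
theorem is_valid_uri_py_spec : Claim_equal_is_valid_uri_py := by
  unfold Claim_equal_is_valid_uri_py Spec_is_valid_uri_py
  intro s _
  unfold is_valid_uri_py is_valid_uri_py_alt pyUriAltPrefix
  by_cases h7 : s.toList.take 7 = "http://".toList
  · have hs : PySem.Str.startswith s "http://" = true := (startswith_take s _).mpr h7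
    rw [h7, hs]
    simp only [Bool.true_or, Bool.not_true]
    exact else_branch_eq s "http://".toList h7 (by decide)
  · by_cases h8 : s.toList.take 8 = "https://".toList
    · have hs : PySem.Str.startswith s "https://" = true := (startswith_take s _).mpr h8
      rw [if_neg h7, h8, hs]
      simp only [Bool.or_true, Bool.true_or, Bool.not_true]
      exact else_branch_eq s "https://".toList h8 (by decide)
    · by_cases h4 : s.toList.take 4 = "urn:".toList
      · have hs : PySem.Str.startswith s "urn:" = true := (startswith_take s _).mpr h4
        rw [if_neg h7, if_neg h8, h4, hs]
        simp only [Bool.or_true, Bool.not_true]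
        exact else_branch_eq s "urn:".toList h4 (by decide)
      · have n7 : PySem.Str.startswith s "http://" = false := by
          cases hv : PySem.Str.startswith s "http://"
          · rfl
          · exact absurd ((startswith_take s _).mp hv) h7
        have n8 : PySem.Str.startswith s "https://" = false := by
          cases hv : PySem.Str.startswith s "https://"
          · rfl
          · exact absurd ((startswith_take s _).mp hv) h8
        have n4 : PySem.Str.startswith s "urn:" = false := by
          cases hv : PySem.Str.startswith s "urn:"
          · rfl
          · exact absurd ((startswith_take s _).mp hv) h4
        rw [if_neg h7, if_neg h8, if_neg h4, n7, n8, n4]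
        simp
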